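-- pv_equiv track=rewrite | github.com/allrounder02/LimeScribe | core/tts_text.py | _inject_periods
-- ===== SOURCE A (Python) =====
-- def _inject_periods(words: list[str], target_words: int) -> str:
--     segments: list[str] = []
--     buffer: list[str] = []
--     for word in words:
--         buffer.append(word)
--         if len(buffer) >= target_words:
--             piece = " ".join(buffer).strip()
--             if piece and piece[-1] not in ".!?":
--                 piece += "."
--             segments.append(piece)
--             buffer = []
--
--     if buffer:
--         piece = " ".join(buffer).strip()
--         if piece and piece[-1] not in ".!?":
--             piece += "."
--         segments.append(piece)
--
--     return " ".join(segment for segment in segments if segment)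
-- ===== SOURCE B (Python) =====
-- def _inject_periods(words: list[str], target_words: int) -> str:
--     # Chunk the word list in fixed steps instead of buffering word-by-word.
--     step = target_words if target_words >= 1 else 1
--     segments: list[str] = []
--     rest = words
--     while rest:
--         piece = " ".join(rest[:step]).strip()
--         if piece and piece[-1] not in ".!?":
--             piece += "."
--         segments.append(piece)
--         rest = rest[step:]
--     return " ".join(s for s in segments if s)
-- ===== Notes on version B (the rewrite author's own statement) =====
-- stated objective: alternative
-- what changed: Replaces A's word-by-word buffer accumulation with flush points and a separate trailing-buffer block by a single loop that slices the word list in fixed steps (step = max(target_words, 1)), building each segment directly from a slice.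
import Mathlib
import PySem

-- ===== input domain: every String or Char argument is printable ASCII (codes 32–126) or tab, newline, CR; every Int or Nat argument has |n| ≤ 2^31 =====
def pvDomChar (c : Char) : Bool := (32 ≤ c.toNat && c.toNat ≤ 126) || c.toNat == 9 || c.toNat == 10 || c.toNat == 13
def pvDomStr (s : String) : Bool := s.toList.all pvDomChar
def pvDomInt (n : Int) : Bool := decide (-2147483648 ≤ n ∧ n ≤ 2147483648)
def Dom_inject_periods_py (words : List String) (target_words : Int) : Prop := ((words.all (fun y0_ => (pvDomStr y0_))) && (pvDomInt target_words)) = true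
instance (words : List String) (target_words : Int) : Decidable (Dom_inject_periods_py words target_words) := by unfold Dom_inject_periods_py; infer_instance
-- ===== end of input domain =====

-- B chunks the word list by fixed-step slicing in one loop instead of A's buffer-and-flush
-- accumulation with a separate trailing-buffer block (objective: alternative decomposition).


-- ===== PORT A =====
-- piece = " ".join(buffer).strip(); if piece and piece[-1] not in ".!?": piece += "."
-- (piece[-1] via pyGetD with a dummy default: the access is guarded by piece being nonempty)
def pvMkPieceA (buf : List String) : String :=
  let piece := PySem.Str.strip (PySem.Str.join " " buf)
  if piece.toList ≠ [] ∧ PySem.List.pyGetD piece.toList (-1) ' ' ∉ ".!?".toList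
  then String.ofList (piece.toList ++ ['.']) else piece

-- loop body: buffer.append(word); if len(buffer) >= target_words: flush buffer into segments
def pvStepA (target_words : Int) (st : List String × List String) (word : String) :
    List String × List String :=
  let buffer := st.2 ++ [word]
  if target_words ≤ (buffer.length : Int) then (st.1 ++ [pvMkPieceA buffer], [])
  else (st.1, buffer)

def inject_periods_py (words : List String) (target_words : Int) : String :=
  let st := words.foldl (pvStepA target_words) ([], [])
  let segments := if st.2 ≠ [] then st.1 ++ [pvMkPieceA st.2] else st.1
  PySem.Str.join " " (segments.filter (fun s => s.toList ≠ []))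

-- ===== PORT B =====
def pvMkPieceB (buf : List String) : String :=
  let piece := PySem.Str.strip (PySem.Str.join " " buf)
  if piece.toList ≠ [] ∧ PySem.List.pyGetD piece.toList (-1) ' ' ∉ ".!?".toList
  then String.ofList (piece.toList ++ ['.']) else piece

-- while rest: emit a segment from rest[:step]; rest = rest[step:]
-- (fuel = initial list length is a totality guard only: each pass drops at least one word;
--  the 'step < 1' test never fires on B's calls, which always have 1 <= step)
def pvLoopB (step : Int) : Nat → List String → List String → List String
  | 0, segments, _ => segments
  | fuel + 1, segments, rest =>
    if rest = [] ∨ step < 1 then segments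
    else
      pvLoopB step fuel (segments ++ [pvMkPieceB (PySem.List.slice rest none (some step))])
        (PySem.List.slice rest (some step) none)

def inject_periods_py_alt (words : List String) (target_words : Int) : String :=
  let step : Int := if 1 ≤ target_words then target_words else 1
  let segments := pvLoopB step words.length [] words
  PySem.Str.join " " (segments.filter (fun s => s.toList ≠ []))

-- ===== PRECONDITION & SPEC =====
def Spec_inject_periods_py (words : List String) (target_words : Int) (out : String) : Prop := out = inject_periods_py_alt words target_words
instance (words : List String) (target_words : Int) (out : String) : Decidable (Spec_inject_periods_py words target_words out) := by unfold Spec_inject_periods_py; infer_instance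

-- ===== CLAIM (what is proved, stated in full; the proofs are below) =====
def Claim_equal_inject_periods_py : Prop := ∀ (words : List String) (target_words : Int), Dom_inject_periods_py words target_words → Spec_inject_periods_py words target_words (inject_periods_py words target_words)

-- ===== LEMMAS AND PROOFS =====

theorem pvMk_eq : pvMkPieceA = pvMkPieceB := rfl

-- the chunks of size s1+1 that B's slicing loop walks through
def pvChunks (s1 : Nat) : List String → List (List String)
  | [] => []
  | w :: rs => (w :: rs.take s1) :: pvChunks s1 (rs.drop s1)
termination_by rest => rest.length
decreasing_by simp [List.length_drop]

theorem pvChunks_nil (s1 : Nat) : pvChunks s1 [] = [] := pvChunks.eq_1 s1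

theorem pvChunks_cons (s1 : Nat) (w : String) (rs : List String) :
    pvChunks s1 (w :: rs) = (w :: rs.take s1) :: pvChunks s1 (rs.drop s1) := pvChunks.eq_2 s1 w rs

theorem pvLoopB_eq (step : Int) (hs : 1 ≤ step) :
    ∀ (fuel : Nat) (rest : List String), rest.length ≤ fuel → ∀ segs,
      pvLoopB step fuel segs rest = segs ++ (pvChunks (step.toNat - 1) rest).map pvMkPieceB := by
  intro fuel
  induction fuel with
  | zero =>
    intro rest hn segs
    have : rest = [] := by simpa [List.length_eq_zero_iff] using Nat.le_zero.mp hn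
    subst this
    rw [pvLoopB, pvChunks_nil]; simp
  | succ n ih =>
    intro rest hn segs
    match rest with
    | [] => rw [pvLoopB, pvChunks_nil]; simp
    | w :: rs =>
      rw [pvLoopB]
      have hne : ¬ ((w :: rs) = [] ∨ step < 1) := by simp; omega
      rw [if_neg hne]
      rw [PySem.List.slice_to (w :: rs) (b := step) (by omega),
          PySem.List.slice_from (w :: rs) (a := step) (by omega)]
      have h1 : step.toNat = (step.toNat - 1) + 1 := by omega
      rw [h1]
      simp only [List.take_succ_cons, List.drop_succ_cons]
      rw [ih (rs.drop (step.toNat - 1)) (by simp only [List.length_drop]; simp at hn; omega)]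
      rw [pvChunks_cons]
      simp

theorem pvFoldA_short (tw : Int) :
    ∀ (rest buf segs : List String), ((buf.length : Int) + rest.length < tw) →
      rest.foldl (pvStepA tw) (segs, buf) = (segs, buf ++ rest) := by
  intro rest
  induction rest with
  | nil => intro buf segs _; simp
  | cons w rs ih =>
    intro buf segs h
    simp only [List.foldl_cons]
    rw [pvStepA]
    simp only [List.length_cons] at h
    have hc : ¬ tw ≤ ((buf ++ [w]).length : Int) := by
      simp only [List.length_append, List.length_cons, List.length_nil]; push_cast; omega
    rw [if_neg hc]
    rw [ih (buf ++ [w]) segs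
      (by simp only [List.length_append, List.length_cons, List.length_nil]; push_cast; omega)]
    simp

theorem pvFoldA_chunk (tw : Int) (htw : 1 ≤ tw) :
    ∀ (rest buf segs : List String), (tw ≤ (buf.length : Int) + rest.length) →
      ((buf.length : Int) < tw) →
      rest.foldl (pvStepA tw) (segs, buf) =
        (rest.drop (tw.toNat - buf.length)).foldl (pvStepA tw)
          (segs ++ [pvMkPieceA (buf ++ rest.take (tw.toNat - buf.length))], []) := by
  intro rest
  induction rest with
  | nil =>
    intro buf segs h hb
    simp only [List.length_nil, Nat.cast_zero, add_zero] at h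
    omega
  | cons w rs ih =>
    intro buf segs h hb
    simp only [List.foldl_cons]
    rw [pvStepA]
    simp only [List.length_cons] at h
    by_cases hf : tw ≤ ((buf ++ [w]).length : Int)
    · rw [if_pos hf]
      simp only [List.length_append, List.length_cons, List.length_nil] at hf
      have h1 : tw.toNat - buf.length = 1 := by push_cast at hf; omega
      rw [h1]
      simp
    · rw [if_neg hf]
      simp only [List.length_append, List.length_cons, List.length_nil] at hf
      rw [ih (buf ++ [w]) segs
        (by simp only [List.length_append, List.length_cons, List.length_nil]; push_cast; push_cast at h; omega)
        (by simp only [List.length_append, List.length_cons, List.length_nil]; push_cast; push_cast at hf; omega)]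
      have h2 : tw.toNat - buf.length = (tw.toNat - (buf ++ [w]).length) + 1 := by
        simp only [List.length_append, List.length_cons, List.length_nil]
        push_cast at hf; omega
      rw [h2]
      simp only [List.take_succ_cons, List.drop_succ_cons]
      simp

theorem pvFoldA_main (tw : Int) (htw : 1 ≤ tw) :
    ∀ (n : Nat) (rest : List String), rest.length ≤ n → ∀ segs,
      (let st := rest.foldl (pvStepA tw) (segs, []);
       if st.2 ≠ [] then st.1 ++ [pvMkPieceA st.2] else st.1)
      = segs ++ (pvChunks (tw.toNat - 1) rest).map pvMkPieceA := by
  intro n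
  induction n with
  | zero =>
    intro rest hn segs
    have : rest = [] := by simpa [List.length_eq_zero_iff] using Nat.le_zero.mp hn
    subst this
    rw [pvChunks_nil]; simp
  | succ n ih =>
    intro rest hn segs
    match rest with
    | [] => rw [pvChunks_nil]; simp
    | w :: rs =>
      by_cases hlen : ((w :: rs).length : Int) < tw
      · rw [pvFoldA_short tw (w :: rs) [] segs (by simpa using hlen)]
        simp only [List.length_cons] at hlen
        have hrs : rs.length ≤ tw.toNat - 1 := by push_cast at hlen; omega
        have htk : rs.take (tw.toNat - 1) = rs := List.take_of_length_le hrs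
        have hdp : rs.drop (tw.toNat - 1) = [] := List.drop_eq_nil_of_le hrs
        rw [pvChunks_cons, htk, hdp, pvChunks_nil]
        simp
      · rw [pvFoldA_chunk tw htw (w :: rs) [] segs
          (by simp only [List.length_nil, Nat.cast_zero, zero_add]; omega)
          (by simpa using htw)]
        have h1 : tw.toNat - ([] : List String).length = (tw.toNat - 1) + 1 := by
          simp only [List.length_nil]; omega
        rw [h1]
        simp only [List.take_succ_cons, List.drop_succ_cons, List.nil_append]
        rw [ih (rs.drop (tw.toNat - 1))
          (by simp only [List.length_drop]; simp only [List.length_cons] at hn; omega)]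
        rw [pvChunks_cons]
        simp

-- target_words <= 0: A flushes after every single word
theorem pvFoldA_nonpos (tw : Int) (htw : ¬ 1 ≤ tw) :
    ∀ (rest segs : List String),
      rest.foldl (pvStepA tw) (segs, []) = (segs ++ rest.map (fun w => pvMkPieceA [w]), []) := by
  intro rest
  induction rest with
  | nil => intro segs; simp
  | cons w rs ih =>
    intro segs
    simp only [List.foldl_cons]
    rw [pvStepA]
    have hc : tw ≤ ((([] : List String) ++ [w]).length : Int) := by simp; omega
    rw [if_pos hc]
    rw [ih]
    simp

theorem pvChunks_zero : ∀ rest : List String, pvChunks 0 rest = rest.map (fun w => [w]) := by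
  intro rest
  induction rest with
  | nil => rw [pvChunks_nil]; simp
  | cons w rs ih => rw [pvChunks_cons]; simpa using ih

-- ===== VERDICT (by name: the statement is the Claim_ definition above) =====
theorem inject_periods_py_spec : Claim_equal_inject_periods_py := by
  intro words tw _
  unfold Spec_inject_periods_py inject_periods_py inject_periods_py_alt
  dsimp only
  by_cases h : 1 ≤ tw
  · rw [if_pos h, pvLoopB_eq tw h words.length words (le_refl _) [],
        pvFoldA_main tw h words.length words (le_refl _) []]
    simp [pvMk_eq]
  · rw [if_neg h, pvLoopB_eq 1 (le_refl 1) words.length words (le_refl _) []]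
    rw [pvFoldA_nonpos tw h words []]
    simp [pvChunks_zero, pvMk_eq, Function.comp_def]
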